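-- pv_equiv track=rewrite | github.com/sciurus0/slskd-csvReader | slskd-spotify.py | get_priority_group
-- ===== SOURCE A (Python) =====
-- EXCLUDED_EXTENSIONS = ['.lrc']          # File extensions to exclude entirely
--
-- ALLOWED_FORMATS = ['.mp3', '.m4a', '.flac']  # In order of priority
--
-- def file_has_excluded_extension(filename, excluded_extensions):
--     """Check if a file has one of the excluded extensions."""
--     if not filename:
--         return False
--     return any(filename.lower().endswith(ext.lower()) for ext in excluded_extensions)
--
-- def get_priority_group(filename):
--     """
--     Get the priority group for a file based on its extension.
--
--     Returns:
--         0-2: Position in ALLOWED_FORMATS list (lower is better)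
--         999: Not in allowed formats (will be skipped)
--     """
--     if not filename:
--         return 999
--
--     # Skip excluded extensions first
--     if file_has_excluded_extension(filename, EXCLUDED_EXTENSIONS):
--         return 999
--
--     # Check for allowed formats in priority order
--     for i, ext in enumerate(ALLOWED_FORMATS):
--         if filename.lower().endswith(ext.lower()):
--             return i
--
--     # Not an allowed format
--     return 999
-- ===== SOURCE B (Python) =====
-- PRIORITY = {'mp3': 0, 'm4a': 1, 'flac': 2}  # allowed extensions in priority order
--
-- def get_priority_group(filename):
--     """Single reverse scan: collect the chars after the last dot, then one table lookup."""
--     ext = []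
--     for ch in reversed(filename):
--         if ch == '.':
--             return PRIORITY.get(''.join(reversed(ext)).lower(), 999)
--         ext.append(ch)
--     return 999
-- ===== Notes on version B (the rewrite author's own statement) =====
-- stated objective: idiomatic
-- what changed: B replaces A's two case-insensitive endswith scans over the excluded and allowed extension lists by a single reverse scan that extracts the extension after the last dot once and looks it up in one priority table with default 999.
import Mathlib
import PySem

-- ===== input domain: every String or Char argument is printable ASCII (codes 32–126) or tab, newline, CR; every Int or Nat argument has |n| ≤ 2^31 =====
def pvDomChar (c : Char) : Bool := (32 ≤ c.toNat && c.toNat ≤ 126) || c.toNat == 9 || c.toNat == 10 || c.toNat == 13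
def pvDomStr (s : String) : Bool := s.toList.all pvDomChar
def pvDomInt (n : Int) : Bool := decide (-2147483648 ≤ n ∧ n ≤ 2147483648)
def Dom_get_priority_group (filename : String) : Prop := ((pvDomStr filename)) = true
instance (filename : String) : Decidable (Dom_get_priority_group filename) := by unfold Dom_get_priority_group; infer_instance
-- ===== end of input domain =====

-- B replaces A's two endswith scans over extension lists by one reverse scan that extracts the
-- extension once and looks it up in a single priority table (objective: idiomatic, same cost).

-- ===== PORT A =====
def EXCLUDED_EXTENSIONS : List String := [".lrc"]

def ALLOWED_FORMATS : List String := [".mp3", ".m4a", ".flac"]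

def file_has_excluded_extension (filename : String) (excluded_extensions : List String) : Bool :=
  if PySem.Str.len filename == 0 then false
  else excluded_extensions.any
    (fun ext => PySem.Str.endswith (PySem.Str.lower filename) (PySem.Str.lower ext))

-- the 'for i, ext in enumerate(ALLOWED_FORMATS)' early-return loop
def get_priority_group_loop (filename : String) : List (Int × String) → Int
  | [] => 999
  | (i, ext) :: rest =>
    if PySem.Str.endswith (PySem.Str.lower filename) (PySem.Str.lower ext) then i
    else get_priority_group_loop filename rest

def get_priority_group (filename : String) : Int :=
  if PySem.Str.len filename == 0 then 999
  else if file_has_excluded_extension filename EXCLUDED_EXTENSIONS then 999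
  else get_priority_group_loop filename (PySem.List.enumerate ALLOWED_FORMATS)

-- ===== PORT B =====
def PRIORITY : PySem.Dict String Int :=
  ((PySem.Dict.empty.insert "mp3" 0).insert "m4a" 1).insert "flac" 2

-- the 'for ch in reversed(filename)' loop; ext is the list B appends to,
-- ''.join(reversed(ext)) is String.ofList ext.reverse
def get_priority_group_alt_go (ext : List Char) : List Char → Int
  | [] => 999
  | c :: rest =>
    if c = '.' then PySem.Dict.getD PRIORITY (PySem.Str.lower (String.ofList ext.reverse)) 999
    else get_priority_group_alt_go (ext ++ [c]) rest

def get_priority_group_alt (filename : String) : Int :=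
  get_priority_group_alt_go [] filename.toList.reverse

-- ===== PRECONDITION & SPEC =====
def Spec_get_priority_group (filename : String) (out : Int) : Prop := out = get_priority_group_alt filename
instance (filename : String) (out : Int) : Decidable (Spec_get_priority_group filename out) := by unfold Spec_get_priority_group; infer_instance

-- ===== CLAIM (what is proved, stated in full; the proofs are below) =====
def Claim_equal_get_priority_group : Prop := ∀ (filename : String), Dom_get_priority_group filename → Spec_get_priority_group filename (get_priority_group filename)

-- ===== LEMMAS AND PROOFS =====

-- lowering a character cannot create or destroy a dot
theorem pv_lowerChar_ne (c : Char) : PySem.Chars.lowerChar c ≠ '.' ↔ c ≠ '.' := by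
  simp only [PySem.Chars.lowerChar]
  split_ifs with h
  · simp only [PySem.Chars.isupper, Bool.and_eq_true, decide_eq_true_eq] at h
    obtain ⟨h1, h2⟩ := h
    have hb1 : 65 ≤ c.toNat := Nat.succ_le_of_lt h1
    have hb2 : c.toNat ≤ 90 := Fin.mk_le_mk.mp h2
    constructor
    · intro _ heq
      subst heq
      simp at hb1
    · intro _ hcon
      have h3 := congrArg Char.toNat hcon
      rw [Char.toNat_ofNat, if_pos (Or.inl (by omega))] at h3
      have h46 : ('.' : Char).toNat = 46 := by decide
      rw [h46] at h3
      omega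
  · exact Iff.rfl

-- a dot-free pattern w followed by '.' is a prefix of the lowered reversed name r
-- iff r contains a dot and the chars before its first dot lower to w
theorem pv_prefix_iff (w : List Char) (hw : '.' ∉ w) : ∀ (r : List Char),
    ((w ++ ['.']) <+: r.map PySem.Chars.lowerChar ↔
      ('.' ∈ r ∧ (r.takeWhile (· ≠ '.')).map PySem.Chars.lowerChar = w)) := by
  induction w with
  | nil =>
    intro r
    cases r with
    | nil => simp
    | cons c rest =>
      by_cases hc : c = '.'
      · subst hc
        simp [List.takeWhile_cons, List.cons_prefix_cons, PySem.Chars.lowerChar,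
          PySem.Chars.isupper]
      · have hlc : PySem.Chars.lowerChar c ≠ '.' := (pv_lowerChar_ne c).mpr hc
        simp [List.takeWhile_cons, hc, List.cons_prefix_cons, hlc, Ne.symm hlc]
  | cons a w' ih =>
    intro r
    cases r with
    | nil => simp
    | cons c rest =>
      by_cases hc : c = '.'
      · subst hc
        have ha : a ≠ '.' := fun h => hw (h ▸ List.mem_cons_self ..)
        simp [List.takeWhile_cons, List.cons_prefix_cons, PySem.Chars.lowerChar,
          PySem.Chars.isupper, ha]
      · have hw' : '.' ∉ w' := fun h => hw (List.mem_cons_of_mem _ h)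
        simp only [List.map_cons, List.cons_append, List.cons_prefix_cons,
          List.mem_cons, List.takeWhile_cons]
        rw [ih hw' rest]
        simp only [hc, decide_eq_true_eq, if_pos, decide_not, Ne.symm hc]
        simp [hc, Ne.symm hc]
        tauto

-- A's endswith test, read on the reversed character list
theorem pv_ends (filename : String) (w : List Char) (hw : '.' ∉ w) (e : String)
    (he : e.toList.reverse = w ++ ['.']) :
    (PySem.Str.endswith (PySem.Str.lower filename) e = true ↔
      ('.' ∈ filename.toList.reverse ∧
        (filename.toList.reverse.takeWhile (· ≠ '.')).map PySem.Chars.lowerChar = w)) := by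
  rw [PySem.Str.endswith_eq, PySem.Chars.endswith_iff, PySem.Str.toList_lower,
    ← List.reverse_prefix]
  rw [he]
  have : (PySem.Chars.lower filename.toList).reverse
      = filename.toList.reverse.map PySem.Chars.lowerChar := by
    simp [PySem.Chars.lower]
  rw [this]
  exact pv_prefix_iff w hw _

-- B's loop: if r has a dot, look up the (re-reversed, lowered) chars before it, else 999
theorem pv_go_spec : ∀ (r ext : List Char),
    get_priority_group_alt_go ext r =
      if '.' ∈ r then
        PySem.Dict.getD PRIORITY
          (PySem.Str.lower (String.ofList (ext ++ r.takeWhile (· ≠ '.')).reverse)) 999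
      else 999 := by
  intro r
  induction r with
  | nil => intro ext; simp [get_priority_group_alt_go]
  | cons c rest ih =>
    intro ext
    by_cases hc : c = '.'
    · subst hc
      simp [get_priority_group_alt_go, List.takeWhile_cons]
    · rw [get_priority_group_alt_go]
      simp only [if_neg hc, ih (ext ++ [c])]
      simp [List.takeWhile_cons, hc, Ne.symm hc]

-- the priority-table lookup, computed for an arbitrary key list
theorem pv_lookup (v : List Char) :
    PySem.Dict.getD PRIORITY (String.ofList v) 999 =
      if v = ['m','p','3'] then 0 else if v = ['m','4','a'] then 1
      else if v = ['f','l','a','c'] then 2 else 999 := by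
  have hb : ∀ (w : List Char), (String.ofList w == String.ofList v) = decide (w = v) := by
    intro w
    rw [Bool.eq_iff_iff]
    simp only [beq_iff_eq, decide_eq_true_eq]
    exact ⟨fun h => by simpa using congrArg String.toList h, fun h => h ▸ rfl⟩
  have hm : ("mp3" : String) = String.ofList ['m','p','3'] := by decide
  have h4 : ("m4a" : String) = String.ofList ['m','4','a'] := by decide
  have hf : ("flac" : String) = String.ofList ['f','l','a','c'] := by decide
  have hits : PRIORITY.items = [("mp3", 0), ("m4a", 1), ("flac", 2)] := by decide
  simp only [PySem.Dict.getD, PySem.Dict.get?, hits, hm, h4, hf, List.find?_cons, hb]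
  by_cases h1 : ['m','p','3'] = v
  · simp [← h1]
  · by_cases h2 : ['m','4','a'] = v
    · simp [← h2]
    · by_cases h3 : ['f','l','a','c'] = v
      · simp [← h3]
      · simp [h1, h2, h3, Ne.symm h1, Ne.symm h2, Ne.symm h3]

-- lowering commutes with join-of-reversed: B's key is the lowered reversed takeWhile list
theorem pv_lower_key (t : List Char) :
    PySem.Str.lower (String.ofList t.reverse)
      = String.ofList (t.map PySem.Chars.lowerChar).reverse := by
  have h : (PySem.Str.lower (String.ofList t.reverse)).toList
      = (String.ofList (t.map PySem.Chars.lowerChar).reverse).toList := by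
    simp [PySem.Str.toList_lower, PySem.Chars.lower]
  exact String.toList_inj.mp h

theorem pv_main (filename : String) :
    get_priority_group filename = get_priority_group_alt filename := by
  have hm3 := pv_ends filename ['3','p','m'] (by decide) ".mp3" (by decide)
  have hm4 := pv_ends filename ['a','4','m'] (by decide) ".m4a" (by decide)
  have hfl := pv_ends filename ['c','a','l','f'] (by decide) ".flac" (by decide)
  have hlr := pv_ends filename ['c','r','l'] (by decide) ".lrc" (by decide)
  have hen : PySem.List.enumerate ALLOWED_FORMATS
      = [((0 : Int), ".mp3"), (1, ".m4a"), (2, ".flac")] := by decide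
  have hl1 : PySem.Str.lower ".mp3" = ".mp3" := by decide
  have hl2 : PySem.Str.lower ".m4a" = ".m4a" := by decide
  have hl3 : PySem.Str.lower ".flac" = ".flac" := by decide
  have hl4 : PySem.Str.lower ".lrc" = ".lrc" := by decide
  unfold get_priority_group_alt
  rw [pv_go_spec]
  by_cases hdot : '.' ∈ filename.toList.reverse
  · -- the name has a dot: both sides are decided by the lowered chars before the last dot
    have hne : filename.toList ≠ [] := by
      intro h; rw [h] at hdot; simp at hdot
    have hlen : (PySem.Str.len filename == 0) = false := by
      simp [PySem.Str.len_eq]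
      intro h
      exact hne (by simp [h])
    have e1 : PySem.Str.endswith (PySem.Str.lower filename) ".mp3"
        = decide ((filename.toList.reverse.takeWhile (· ≠ '.')).map PySem.Chars.lowerChar
            = ['3','p','m']) := by
      rw [Bool.eq_iff_iff, hm3]; simp [hdot]
    have e2 : PySem.Str.endswith (PySem.Str.lower filename) ".m4a"
        = decide ((filename.toList.reverse.takeWhile (· ≠ '.')).map PySem.Chars.lowerChar
            = ['a','4','m']) := by
      rw [Bool.eq_iff_iff, hm4]; simp [hdot]
    have e3 : PySem.Str.endswith (PySem.Str.lower filename) ".flac"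
        = decide ((filename.toList.reverse.takeWhile (· ≠ '.')).map PySem.Chars.lowerChar
            = ['c','a','l','f']) := by
      rw [Bool.eq_iff_iff, hfl]; simp [hdot]
    have e4 : PySem.Str.endswith (PySem.Str.lower filename) ".lrc"
        = decide ((filename.toList.reverse.takeWhile (· ≠ '.')).map PySem.Chars.lowerChar
            = ['c','r','l']) := by
      rw [Bool.eq_iff_iff, hlr]; simp [hdot]
    rw [if_pos hdot]
    simp only [List.nil_append, pv_lower_key, pv_lookup]
    simp only [get_priority_group, file_has_excluded_extension, EXCLUDED_EXTENSIONS, hen,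
      get_priority_group_loop, List.any_cons, List.any_nil, hl1, hl2, hl3, hl4,
      e1, e2, e3, e4, hlen, Bool.false_eq_true, if_false, Bool.or_false]
    split_ifs <;> simp_all [List.reverse_eq_iff]
  · -- no dot anywhere: every endswith test fails and B's loop runs off the end
    have e1 : PySem.Str.endswith (PySem.Str.lower filename) ".mp3" = false := by
      rw [Bool.eq_false_iff]; intro h; exact hdot (hm3.mp h).1
    have e2 : PySem.Str.endswith (PySem.Str.lower filename) ".m4a" = false := by
      rw [Bool.eq_false_iff]; intro h; exact hdot (hm4.mp h).1
    have e3 : PySem.Str.endswith (PySem.Str.lower filename) ".flac" = false := by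
      rw [Bool.eq_false_iff]; intro h; exact hdot (hfl.mp h).1
    have e4 : PySem.Str.endswith (PySem.Str.lower filename) ".lrc" = false := by
      rw [Bool.eq_false_iff]; intro h; exact hdot (hlr.mp h).1
    rw [if_neg hdot]
    simp only [get_priority_group, file_has_excluded_extension, EXCLUDED_EXTENSIONS, hen,
      get_priority_group_loop, List.any_cons, List.any_nil, hl1, hl2, hl3, hl4,
      e1, e2, e3, e4, Bool.false_eq_true, if_false, Bool.or_false, ite_self]

-- ===== VERDICT (by name: the statement is the Claim_ definition above) =====
theorem get_priority_group_spec : Claim_equal_get_priority_group := by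
  intro filename _
  exact pv_main filename
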